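-- pv_equiv track=rewrite | github.com/DeBroglie3141/Codeforces | D_Distinct_Split.py | max_distinct_split
-- ===== SOURCE A (Python) =====
-- def max_distinct_split(n, s):
--     prefix_set = set()
--     prefix_count = [0] * n
--
--     for i in range(n):
--         prefix_set.add(s[i])
--         prefix_count[i] = len(prefix_set)
--
--     suffix_set = set()
--     suffix_count = [0] * n
--
--     for i in range(n - 1, -1, -1):
--         suffix_set.add(s[i])
--         suffix_count[i] = len(suffix_set)
--
--     max_value = 0
--     for i in range(n - 1):
--         max_value = max(max_value, prefix_count[i] + suffix_count[i + 1])
--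
--     return max_value
-- ===== SOURCE B (Python) =====
-- def max_distinct_split(n, s):
--     if n <= 1:
--         return 0
--     t = s[:n]
--     right = {}
--     for ch in t:
--         right[ch] = right.get(ch, 0) + 1
--     rd = len(right)
--     left = set()
--     best = 0
--     for ch in t[:-1]:
--         right[ch] -= 1
--         if right[ch] == 0:
--             rd -= 1
--         left.add(ch)
--         best = max(best, len(left) + rd)
--     return best
-- ===== Notes on version B (the rewrite author's own statement) =====
-- stated objective: alternative
-- what changed: B replaces A's two index-driven precomputed prefix/suffix distinct-count arrays by a single incremental left-to-right pass that maintains a growing left set and a count dictionary of the remaining right part whose distinct-key count is decremented as characters move left.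
-- outside the precondition, e.g. on max_distinct_split(5, 'ab'): A raises IndexError, B returns 2
import Mathlib
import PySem

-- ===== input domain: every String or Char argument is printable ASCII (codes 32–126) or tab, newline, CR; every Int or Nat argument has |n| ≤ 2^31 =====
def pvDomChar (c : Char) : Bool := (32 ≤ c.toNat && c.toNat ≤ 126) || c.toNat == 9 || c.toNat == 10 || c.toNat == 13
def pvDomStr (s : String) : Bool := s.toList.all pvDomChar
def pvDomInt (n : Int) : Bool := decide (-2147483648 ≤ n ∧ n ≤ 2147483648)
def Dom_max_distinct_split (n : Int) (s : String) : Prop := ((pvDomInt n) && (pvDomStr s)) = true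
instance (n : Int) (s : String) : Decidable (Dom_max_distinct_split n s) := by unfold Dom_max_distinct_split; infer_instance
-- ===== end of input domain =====

-- B replaces A's two precomputed prefix/suffix distinct-count arrays by a single left-to-right
-- pass that maintains a left set and a decrementing right count dictionary (objective: alternative).

-- ===== PORT A =====
def max_distinct_split (n : Int) (s : String) : Int :=
  let cs := s.toList
  let pre := ((PySem.List.pyRange 0 n).foldl
      (fun (st : PySem.Set Char × List Int) i =>
        let ps := PySem.Set.add st.1 (PySem.List.pyGetD cs i ' ')
        (ps, st.2.set i.toNat ((ps.length : Int))))
      (PySem.Set.empty, List.replicate n.toNat 0)).2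
  let suf := ((PySem.List.pyRange (n - 1) (-1) (-1)).foldl
      (fun (st : PySem.Set Char × List Int) i =>
        let ss := PySem.Set.add st.1 (PySem.List.pyGetD cs i ' ')
        (ss, st.2.set i.toNat ((ss.length : Int))))
      (PySem.Set.empty, List.replicate n.toNat 0)).2
  (PySem.List.pyRange 0 (n - 1)).foldl
      (fun mv i => max mv (PySem.List.pyGetD pre i 0 + PySem.List.pyGetD suf (i + 1) 0)) 0

-- ===== PORT B =====
def max_distinct_split_alt (n : Int) (s : String) : Int :=
  if n ≤ 1 then 0
  else
    let t := PySem.List.slice s.toList none (some n)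
    let right := t.foldl (fun (d : PySem.Dict Char Int) ch => d.insert ch (d.getD ch 0 + 1))
      PySem.Dict.empty
    let rd : Int := right.size
    let st := t.dropLast.foldl
      (fun (st : PySem.Dict Char Int × Int × PySem.Set Char × Int) ch =>
        let r1 := st.1.insert ch (st.1.getD ch 0 - 1)
        let rd1 := if r1.getD ch 0 == 0 then st.2.1 - 1 else st.2.1
        let lf := PySem.Set.add st.2.2.1 ch
        (r1, rd1, lf, max st.2.2.2 ((lf.length : Int) + rd1)))
      (right, rd, PySem.Set.empty, 0)
    st.2.2.2

-- ===== PRECONDITION & SPEC =====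
-- Pre_ excludes exactly the inputs with n > len(s), on which A raises IndexError.
def Pre_max_distinct_split (n : Int) (s : String) : Prop := n ≤ (s.toList.length : Int)
instance (n : Int) (s : String) : Decidable (Pre_max_distinct_split n s) := by
  unfold Pre_max_distinct_split; infer_instance

def pvWitness_max_distinct_split : Int × String := (4, "abca")

def Spec_max_distinct_split (n : Int) (s : String) (out : Int) : Prop := out = max_distinct_split_alt n s
instance (n : Int) (s : String) (out : Int) : Decidable (Spec_max_distinct_split n s out) := by
  unfold Spec_max_distinct_split; infer_instance

-- ===== CLAIM (what is proved, stated in full; the proofs are below) =====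
def Claim_equal_max_distinct_split : Prop := ∀ (n : Int) (s : String), Dom_max_distinct_split n s → Pre_max_distinct_split n s → Spec_max_distinct_split n s (max_distinct_split n s)

-- ===== LEMMAS AND PROOFS =====

-- number of distinct characters of a list, as Python's len(set(l))
def dcount (l : List Char) : Int := ((PySem.Set.ofList l).length : Int)

-- any duplicate-free list with the same members as l has length len(set(l))
theorem nodupLen (u l : List Char) (hu : u.Nodup) (h : ∀ x, x ∈ u ↔ x ∈ l) :
    (u.length : Int) = dcount l := by
  have hp : u.Perm (PySem.Set.ofList l) :=
    (List.perm_ext_iff_of_nodup hu (PySem.Set.nodup_ofList l)).2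
      (by intro a; rw [h a, PySem.Set.mem_ofList])
  simp [dcount, hp.length_eq]

theorem dcount_cons (x : Char) (l : List Char) :
    dcount (x :: l) = dcount l + (if x ∈ l then 0 else 1) := by
  by_cases hx : x ∈ l
  · have := nodupLen (PySem.Set.ofList (x :: l)) l (PySem.Set.nodup_ofList _)
      (by intro y; rw [PySem.Set.mem_ofList];
          exact ⟨fun hy => (List.mem_cons.1 hy).elim (fun h => h ▸ hx) id,
                 fun hy => List.mem_cons_of_mem _ hy⟩)
    simp [hx, dcount] at this ⊢
    omega
  · have := nodupLen (x :: PySem.Set.ofList l) (x :: l)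
      (List.nodup_cons.2 ⟨by simpa [PySem.Set.mem_ofList] using hx, PySem.Set.nodup_ofList _⟩)
      (by intro y; simp [PySem.Set.mem_ofList])
    simp [hx, dcount] at this ⊢
    omega

-- the common specification both programs are reduced to
def specf (t : List Char) : Int → Nat → Int :=
  fun mv k => max mv (dcount (t.take (k + 1)) + dcount (t.drop (k + 1)))

theorem A_prefix (cs : List Char) (m : Nat) (hm : m ≤ cs.length) :
    ∀ (i : Nat), i ≤ m →
    (List.range i).foldl
        (fun (st : PySem.Set Char × List Int) k =>
          let ps := PySem.Set.add st.1 (cs.getD k ' ')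
          (ps, st.2.set k ((ps.length : Int))))
        (PySem.Set.empty, List.replicate m 0)
    = (PySem.Set.ofList ((cs.take m).take i),
       (List.range i).map (fun j => dcount ((cs.take m).take (j + 1))) ++ List.replicate (m - i) 0) := by
  intro i
  induction i with
  | zero => intro _; simp [PySem.Set.empty, PySem.Set.ofList]
  | succ i ih =>
    intro hi1
    have hi : i < m := by omega
    rw [List.range_succ, List.foldl_append, ih (by omega)]
    simp only [List.foldl_cons, List.foldl_nil]
    have hcs : i < cs.length := by omega
    have htk : i < (cs.take m).length := by simp [List.length_take]; omega
    have hget : cs.getD i ' ' = (cs.take m)[i] := by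
      rw [List.getD_eq_getElem _ _ hcs, List.getElem_take]
    have htake : (cs.take m).take (i + 1) = (cs.take m).take i ++ [(cs.take m)[i]] := by
      rw [List.take_add_one, List.getElem?_eq_getElem htk]; rfl
    rw [Prod.mk.injEq]
    constructor
    · rw [hget, htake, PySem.Set.ofList_append_singleton]
    · rw [List.map_append]
      rw [List.set_append]
      simp only [List.length_map, List.length_range]
      rw [if_neg (by omega)]
      have : m - i = (m - (i+1)) + 1 := by omega
      rw [this, List.replicate_succ]
      simp only [List.set_cons_zero, Nat.sub_self]
      simp only [List.map_cons, List.map_nil, List.append_assoc, List.cons_append, List.nil_append]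
      congr 2
      rw [hget, dcount, htake, PySem.Set.ofList_append_singleton]

theorem A_suffix (cs : List Char) (m : Nat) (hm : m ≤ cs.length) :
    ∀ (j : Nat), j ≤ m → ∀ (ss : PySem.Set Char) (arr : List Int),
    ss.Nodup → (∀ x, x ∈ ss ↔ x ∈ (cs.take m).drop j) →
    arr = List.replicate j 0 ++ (List.range' j (m - j)).map (fun i => dcount ((cs.take m).drop i)) →
    ((PySem.List.pyRange ((j : Int) - 1) (-1) (-1)).foldl
        (fun (st : PySem.Set Char × List Int) i =>
          let ssx := PySem.Set.add st.1 (PySem.List.pyGetD cs i ' ')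
          (ssx, st.2.set i.toNat ((ssx.length : Int))))
        (ss, arr)).2
    = (List.range' 0 m).map (fun i => dcount ((cs.take m).drop i)) := by
  intro j
  induction j with
  | zero =>
    intro _ ss arr _ _ harr
    rw [PySem.List.pyRange_neg_one_eq_nil (by norm_num)]
    simpa using harr
  | succ j ih =>
    intro hj1 ss arr hnd hmem harr
    have hc : PySem.List.pyRange ((↑(j+1) : Int) - 1) (-1) (-1)
        = (j : Int) :: PySem.List.pyRange ((j : Int) - 1) (-1) (-1) := by
      have : ((↑(j+1) : Int) - 1) = (j : Int) := by push_cast; ring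
      rw [this, PySem.List.pyRange_neg_one_cons (by omega)]
    rw [hc, List.foldl_cons]
    have hj : j < m := by omega
    have hcs : j < cs.length := by omega
    have htk : j < (cs.take m).length := by simp [List.length_take]; omega
    have hget : PySem.List.pyGetD cs (j : Int) ' ' = (cs.take m)[j] := by
      rw [PySem.List.pyGetD_natCast, List.getD_eq_getElem _ _ hcs, List.getElem_take]
    apply ih (by omega)
    · exact PySem.Set.nodup_add _ _ hnd
    · intro x
      rw [PySem.Set.mem_add, hget, hmem]
      rw [← List.getElem_cons_drop htk]
      simp [or_comm]
    · -- array invariant at j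
      rw [harr]
      have hv : ((PySem.Set.add ss (PySem.List.pyGetD cs (j : Int) ' ')).length : Int)
          = dcount ((cs.take m).drop j) := by
        apply nodupLen _ _ (PySem.Set.nodup_add _ _ hnd)
        intro x
        rw [PySem.Set.mem_add, hget, hmem, ← List.getElem_cons_drop htk]
        simp [or_comm]
      rw [Int.toNat_natCast]
      rw [List.set_append, if_pos (by simp)]
      have h1 : List.replicate (j+1) (0:Int) = List.replicate j 0 ++ [0] := by
        rw [← List.replicate_succ']
      rw [h1, List.set_append, if_neg (by simp), List.length_replicate]
      simp only [Nat.sub_self, List.set_cons_zero]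
      have h2 : m - j = (m - (j+1)) + 1 := by omega
      rw [h2, List.range'_succ, List.map_cons]
      rw [hv]
      simp

theorem A_eq_spec (n : Int) (s : String) (h1 : 1 ≤ n) (h2 : n ≤ (s.toList.length : Int)) :
    max_distinct_split n s
      = (List.range (n.toNat - 1)).foldl (specf (s.toList.take n.toNat)) 0 := by
  set cs := s.toList with hcs
  set m := n.toNat with hmdef
  have hm : m ≤ cs.length := by omega
  have hn : (m : Int) = n := by omega
  -- prefix array
  have hpre : ((PySem.List.pyRange 0 n).foldl
      (fun (st : PySem.Set Char × List Int) i =>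
        let ps := PySem.Set.add st.1 (PySem.List.pyGetD cs i ' ')
        (ps, st.2.set i.toNat ((ps.length : Int))))
      (PySem.Set.empty, List.replicate m 0)).2
      = (List.range m).map (fun j => dcount ((cs.take m).take (j + 1))) := by
    rw [← hn, PySem.List.pyRange_zero, List.foldl_map]
    simp only [PySem.List.pyGetD_natCast, Int.toNat_natCast]
    rw [A_prefix cs m hm m le_rfl]
    simp
  have hsuf : ((PySem.List.pyRange (n - 1) (-1) (-1)).foldl
      (fun (st : PySem.Set Char × List Int) i =>
        let ss := PySem.Set.add st.1 (PySem.List.pyGetD cs i ' ')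
        (ss, st.2.set i.toNat ((ss.length : Int))))
      (PySem.Set.empty, List.replicate m 0)).2
      = (List.range' 0 m).map (fun i => dcount ((cs.take m).drop i)) := by
    rw [← hn]
    exact A_suffix cs m hm m le_rfl PySem.Set.empty _ (by simp [PySem.Set.empty])
      (by intro x
          rw [List.drop_eq_nil_of_le (by simp [List.length_take])]
          simp [PySem.Set.empty])
      (by simp)
  rw [max_distinct_split]
  rw [hpre, hsuf]
  have hm1 : (n - 1).toNat = m - 1 := by omega
  rw [PySem.List.pyRange_zero (n - 1), hm1, List.foldl_map]
  apply PySem.List.foldl_congr_mem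
  intro acc k hk
  have hk' : k < m - 1 := List.mem_range.1 hk
  have e1 : PySem.List.pyGetD ((List.range m).map (fun j => dcount ((cs.take m).take (j + 1)))) (↑k) 0
      = dcount ((cs.take m).take (k + 1)) := by
    rw [PySem.List.pyGetD_natCast, PySem.List.getD_map_range _ _ _ _ (by omega)]
  have e2 : PySem.List.pyGetD ((List.range' 0 m).map (fun i => dcount ((cs.take m).drop i))) ((↑k) + 1) 0
      = dcount ((cs.take m).drop (k + 1)) := by
    have : ((k : Int) + 1) = ((k + 1 : Nat) : Int) := by push_cast; ring
    rw [this, PySem.List.pyGetD_natCast, ← List.range_eq_range',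
      PySem.List.getD_map_range _ _ _ _ (by omega)]
  rw [e1, e2]
  rfl

theorem B_loop (z : Char) (q : List Char) :
    ∀ (T p : List Char) (d : PySem.Dict Char Int) (rd : Int) (lf : PySem.Set Char) (best : Int),
    T = p ++ (q ++ [z]) →
    (∀ x, d.getD x 0 = ((q ++ [z]).count x : Int)) →
    rd = dcount (q ++ [z]) →
    lf.Nodup → (∀ x, x ∈ lf ↔ x ∈ p) →
    (q.foldl
        (fun (st : PySem.Dict Char Int × Int × PySem.Set Char × Int) ch =>
          let r1 := st.1.insert ch (st.1.getD ch 0 - 1)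
          let rd1 := if r1.getD ch 0 == 0 then st.2.1 - 1 else st.2.1
          let lf := PySem.Set.add st.2.2.1 ch
          (r1, rd1, lf, max st.2.2.2 ((lf.length : Int) + rd1)))
        (d, rd, lf, best)).2.2.2
    = (List.range q.length).foldl
        (fun mv k => max mv (dcount (T.take (p.length + k + 1)) + dcount (T.drop (p.length + k + 1)))) best := by
  induction q with
  | nil => intro T p d rd lf best _ _ _ _ _; simp
  | cons ch q ih =>
    intro T p d rd lf best hT hd hrd hnd hmem
    rw [List.foldl_cons]
    dsimp only
    have hcount : d.getD ch 0 = ((q ++ [z]).count ch : Int) + 1 := by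
      rw [hd ch]
      have : List.count ch (ch :: q ++ [z]) = List.count ch (q ++ [z]) + 1 := by
        simp [List.count_cons, List.count_append]
      rw [this]; push_cast; ring
    have hd' : ∀ x, (d.insert ch (d.getD ch 0 - 1)).getD x 0 = ((q ++ [z]).count x : Int) := by
      intro x
      rw [PySem.Dict.getD_insert]
      by_cases hx : x = ch
      · subst hx; rw [if_pos rfl, hcount]; ring
      · rw [if_neg hx, hd x]
        have : List.count x (ch :: q ++ [z]) = List.count x (q ++ [z]) := by
          simp [List.count_cons, List.count_append, Ne.symm hx]
        rw [this]
    have hrd' :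
        (if (d.insert ch (d.getD ch 0 - 1)).getD ch 0 == 0 then rd - 1 else rd)
          = dcount (q ++ [z]) := by
      rw [hd' ch, hrd, show ((ch :: q) ++ [z]) = ch :: (q ++ [z]) by simp, dcount_cons]
      by_cases hm : ch ∈ q ++ [z]
      · have h0 : List.count ch (q ++ [z]) ≠ 0 := fun hc => (List.count_eq_zero.1 hc) hm
        simp only [beq_iff_eq, Nat.cast_eq_zero]
        rw [if_neg h0, if_pos hm]; ring
      · have h0 : List.count ch (q ++ [z]) = 0 := List.count_eq_zero.2 hm
        simp only [beq_iff_eq, Nat.cast_eq_zero]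
        rw [if_pos h0, if_neg hm]; ring
    have hTt : T.take (p.length + 1) = p ++ [ch] := by
      rw [hT]; simp [List.take_append]
    have hTd : T.drop (p.length + 1) = q ++ [z] := by
      rw [hT]; simp [List.drop_append]
    have hlen : ((PySem.Set.add lf ch).length : Int) = dcount (T.take (p.length + 1)) := by
      rw [hTt]
      apply nodupLen _ _ (PySem.Set.nodup_add _ _ hnd)
      intro x
      rw [PySem.Set.mem_add, hmem]
      simp
    rw [hrd']
    rw [ih T (p ++ [ch]) (d.insert ch (d.getD ch 0 - 1)) (dcount (q ++ [z]))
      (PySem.Set.add lf ch) (max best ((PySem.Set.add lf ch).length + dcount (q ++ [z])))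
      (by rw [hT]; simp) hd' rfl (PySem.Set.nodup_add _ _ hnd)
      (by intro x; rw [PySem.Set.mem_add, hmem]; simp)]
    rw [List.length_cons, List.range_succ_eq_map, List.foldl_cons, List.foldl_map]
    have harith : ∀ k : Nat, (p ++ [ch]).length + k + 1 = p.length + (Nat.succ k) + 1 := by
      intro k; simp [List.length_append]; omega
    simp only [harith]
    congr 1
    rw [hlen, ← hTd]

theorem B_eq_spec (n : Int) (s : String) (h1 : 2 ≤ n) (h2 : n ≤ (s.toList.length : Int)) :
    max_distinct_split_alt n s
      = (List.range (n.toNat - 1)).foldl (specf (s.toList.take n.toNat)) 0 := by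
  rw [max_distinct_split_alt, if_neg (by omega)]
  rw [PySem.List.slice_to _ (by omega)]
  dsimp only
  set t := s.toList.take n.toNat with ht
  have htlen : t.length = n.toNat := by rw [ht, List.length_take]; omega
  have htne : t ≠ [] := by intro h; rw [h] at htlen; simp at htlen; omega
  rw [PySem.Dict.foldl_insert_getD_add_one_eq_counter]
  have hsize : ((PySem.Dict.counter t).size : Int) = dcount t := by
    have h1 : (PySem.Dict.counter t).size = (PySem.Dict.counter t).keys.length := by
      simp [PySem.Dict.size, PySem.Dict.keys]
    rw [h1, PySem.Dict.keys_counter]; rfl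
  have hqz : t.dropLast ++ [t.getLast htne] = t := List.dropLast_append_getLast htne
  have hcnt : ∀ x, (PySem.Dict.counter t).getD x 0
      = (((t.dropLast) ++ [t.getLast htne]).count x : Int) := by
    intro x; rw [hqz, PySem.Dict.getD_counter]
  have hrd : ((PySem.Dict.counter t).size : Int) = dcount (t.dropLast ++ [t.getLast htne]) := by
    rw [hqz, hsize]
  have := B_loop (t.getLast htne) t.dropLast t [] (PySem.Dict.counter t)
    ((PySem.Dict.counter t).size : Int) PySem.Set.empty 0
    (by rw [hqz]; simp) hcnt hrd (by simp [PySem.Set.empty]) (by simp [PySem.Set.empty])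
  rw [this]
  have hlen2 : t.dropLast.length = n.toNat - 1 := by
    rw [List.length_dropLast, htlen]
  rw [hlen2]
  apply PySem.List.foldl_congr_mem
  intro acc k hk
  simp only [List.length_nil, Nat.zero_add, specf]

-- ===== VERDICT (by name: the statement is the Claim_ definition above) =====
theorem max_distinct_split_spec : Claim_equal_max_distinct_split := by
  intro n s _ hpre
  unfold Spec_max_distinct_split
  by_cases hn : n ≤ 1
  · have hA : max_distinct_split n s = 0 := by
      simp [max_distinct_split, PySem.List.pyRange_one_eq_nil (show n - 1 ≤ 0 by omega)]
    have hB : max_distinct_split_alt n s = 0 := by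
      simp [max_distinct_split_alt, hn]
    rw [hA, hB]
  · rw [A_eq_spec n s (by omega) hpre, B_eq_spec n s (by omega) hpre]
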